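-- pv_equiv track=rewrite | github.com/pixelboehm/Advent-of-Code | 2020/day_06.py | countAnswers
-- ===== SOURCE A (Python) =====
-- def countAnswers(all_groups):
--     overall_count = 0
--     answer_two = 0
--     for group in all_groups:
--         all_answers = [
--             "a",
--             "b",
--             "c",
--             "d",
--             "e",
--             "f",
--             "g",
--             "h",
--             "i",
--             "j",
--             "k",
--             "l",
--             "m",
--             "n",
--             "o",
--             "p",
--             "q",
--             "r",
--             "s",
--             "t",
--             "u",
--             "v",
--             "w",
--             "x",
--             "y",
--             "z",
--         ]
--         group_answers = ""
--         for person in group: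
--             group_answers += person
--         group_answers = set(group_answers)
--         group_count = len(group_answers)
--         overall_count += group_count
--         for person in group:
--             person = [char for char in person]
--             all_answers = [value for value in all_answers if value in person]
--         answer_two += len(all_answers)
--
--     return overall_count, answer_two
-- ===== SOURCE B (Python) =====
-- def countAnswers(all_groups):
--     overall_count = 0
--     answer_two = 0
--     for group in all_groups:
--         counts = {}
--         for person in group:
--             for ch in set(person):
--                 counts[ch] = counts.get(ch, 0) + 1
--         overall_count += len(counts)
--         n = len(group)
--         answer_two += sum(1 for ch in "abcdefghijklmnopqrstuvwxyz" if counts.get(ch, 0) == n)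
--     return overall_count, answer_two
-- ===== Notes on version B (the rewrite author's own statement) =====
-- stated objective: alternative
-- what changed: Replaces A's per-person narrowing filter of the 26-letter list (and its string concatenation for the union) with one per-group character counter built from each person's character set; union = number of counter keys, intersection = letters whose count equals the group size.
import Mathlib
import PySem

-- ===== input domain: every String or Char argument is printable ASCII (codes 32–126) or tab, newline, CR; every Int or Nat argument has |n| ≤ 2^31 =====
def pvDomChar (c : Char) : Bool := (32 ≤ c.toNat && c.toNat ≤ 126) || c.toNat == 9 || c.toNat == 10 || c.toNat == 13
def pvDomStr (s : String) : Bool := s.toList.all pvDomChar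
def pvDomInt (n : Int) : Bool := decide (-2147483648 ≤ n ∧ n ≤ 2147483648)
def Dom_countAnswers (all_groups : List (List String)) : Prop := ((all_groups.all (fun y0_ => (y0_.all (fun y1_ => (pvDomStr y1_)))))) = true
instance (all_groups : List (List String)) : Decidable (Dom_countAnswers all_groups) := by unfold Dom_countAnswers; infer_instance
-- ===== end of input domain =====

-- B replaces A's per-person narrowing filter with one per-group character Counter:
-- union = number of counter keys, intersection = letters whose count equals the group size (objective: alternative).


-- ===== PORT A =====
-- A's all_answers list of 26 one-char strings, ported as Char (each person's chars are Chars likewise)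
def pyAlphabet : List Char :=
  ['a','b','c','d','e','f','g','h','i','j','k','l','m','n','o','p','q','r','s','t','u','v','w','x','y','z']

def countAnswers (all_groups : List (List String)) : Int × Int :=
  all_groups.foldl (fun (acc : Int × Int) group =>
    let all_answers := pyAlphabet
    -- group_answers += person  (string concat, ported on List Char)
    let group_answers : List Char := group.foldl (fun s p => s ++ p.toList) []
    let group_set : PySem.Set Char := PySem.Set.ofList group_answers
    let group_count : Int := group_set.length
    let all_answers := group.foldl (fun aa p =>
        let person := p.toList
        aa.filter (fun v => v ∈ person)) all_answers
    (acc.1 + group_count, acc.2 + (all_answers.length : Int))) (0, 0)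

-- ===== PORT B =====
def alphaB : List Char := "abcdefghijklmnopqrstuvwxyz".toList

def countAnswers_alt (all_groups : List (List String)) : Int × Int :=
  all_groups.foldl (fun (acc : Int × Int) group =>
    -- counts[ch] = counts.get(ch, 0) + 1 over ch in set(person), for each person
    let counts : PySem.Dict Char Int :=
      group.foldl (fun d p =>
        (PySem.Set.ofList p.toList).foldl (fun d ch => d.insert ch (d.getD ch 0 + 1)) d)
        PySem.Dict.empty
    let n : Int := group.length
    (acc.1 + (counts.size : Int),
     acc.2 + ((alphaB.countP (fun ch => counts.getD ch 0 == n) : Nat) : Int))) (0, 0)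

-- ===== PRECONDITION & SPEC =====
def Spec_countAnswers (all_groups : List (List String)) (out : Int × Int) : Prop := out = countAnswers_alt all_groups
instance (all_groups : List (List String)) (out : Int × Int) : Decidable (Spec_countAnswers all_groups out) := by unfold Spec_countAnswers; infer_instance

-- ===== CLAIM (what is proved, stated in full; the proofs are below) =====
def Claim_equal_countAnswers : Prop := ∀ (all_groups : List (List String)), Dom_countAnswers all_groups → Spec_countAnswers all_groups (countAnswers all_groups)

-- ===== LEMMAS AND PROOFS =====

-- generic: folding over a flatMap = the nested fold
lemma foldl_flatMap_general {α β γ : Type} (l : List α) (f : α → List β) (g : γ → β → γ) (init : γ) :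
    (l.flatMap f).foldl g init = l.foldl (fun a x => (f x).foldl g a) init := by
  induction l generalizing init with
  | nil => rfl
  | cons x xs ih => simp [List.foldl_append, ih]

-- B's nested loop builds Counter(flatMap of per-person dedup lists)
lemma counts_eq_counter (group : List String) :
    group.foldl (fun d p =>
        (PySem.Set.ofList p.toList).foldl (fun d ch => d.insert ch (d.getD ch 0 + 1)) d)
      PySem.Dict.empty
    = PySem.Dict.counter (group.flatMap (fun p => PySem.Set.ofList p.toList)) := by
  rw [← PySem.Dict.foldl_insert_getD_add_one_eq_counter, foldl_flatMap_general]

-- A's sequential narrowing filter = one filter by "in every person"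
lemma foldl_filter_eq (group : List String) (l : List Char) :
    group.foldl (fun aa p => aa.filter (fun v => v ∈ p.toList)) l
    = l.filter (fun v => group.all (fun p => decide (v ∈ p.toList))) := by
  induction group generalizing l with
  | nil => simp
  | cons p rest ih => simp [ih, List.filter_filter, Bool.and_comm]

-- count of a char in the dedup'd flat list = how many persons contain it
lemma count_flat (group : List String) (ch : Char) :
    (group.flatMap (fun p => PySem.Set.ofList p.toList)).count ch
    = group.countP (fun p => decide (ch ∈ p.toList)) := by
  induction group with
  | nil => simp
  | cons p rest ih =>
    simp only [List.flatMap_cons, List.count_append, ih, List.countP_cons]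
    by_cases h : ch ∈ p.toList
    · have : ch ∈ PySem.Set.ofList p.toList := by
        simpa [PySem.Set.mem_ofList] using h
      rw [List.count_eq_one_of_mem (PySem.Set.nodup_ofList _) this]
      simp [h]; omega
    · have : ch ∉ PySem.Set.ofList p.toList := by
        simpa [PySem.Set.mem_ofList] using h
      rw [List.count_eq_zero_of_not_mem this]
      simp [h]

-- the two dedup lists (of raw concat vs dedup'd concat) have the same length
lemma union_len_eq (group : List String) :
    (PySem.Set.ofList (group.foldl (fun s p => s ++ p.toList) [])).length
    = (PySem.Set.ofList (group.flatMap (fun p => PySem.Set.ofList p.toList))).length := by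
  apply List.Perm.length_eq
  rw [List.perm_ext_iff_of_nodup (PySem.Set.nodup_ofList _) (PySem.Set.nodup_ofList _)]
  intro ch
  simp [PySem.Set.mem_ofList, List.mem_flatMap]

lemma per_group_union (group : List String) :
    ((PySem.Set.ofList (group.foldl (fun s p => s ++ p.toList) [])).length : Int)
    = ((group.foldl (fun d p =>
        (PySem.Set.ofList p.toList).foldl (fun d ch => d.insert ch (d.getD ch 0 + 1)) d)
      (PySem.Dict.empty : PySem.Dict Char Int)).size : Int) := by
  simp only [counts_eq_counter]
  have h2 : (PySem.Dict.counter (group.flatMap fun p => PySem.Set.ofList p.toList)).size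
      = (PySem.Set.ofList (group.flatMap fun p => PySem.Set.ofList p.toList)).length := by
    rw [← PySem.Dict.keys_counter (group.flatMap fun p => PySem.Set.ofList p.toList)]
    simp [PySem.Dict.keys, PySem.Dict.size]
  rw [union_len_eq, h2]

lemma per_group_inter (group : List String) :
    ((group.foldl (fun aa p => aa.filter (fun v => v ∈ p.toList)) pyAlphabet).length : Int)
    = ((alphaB.countP (fun ch =>
        (group.foldl (fun d p =>
          (PySem.Set.ofList p.toList).foldl (fun d ch => d.insert ch (d.getD ch 0 + 1)) d)
        (PySem.Dict.empty : PySem.Dict Char Int)).getD ch 0 == (group.length : Int)) : Nat) : Int) := by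
  rw [foldl_filter_eq]
  simp only [counts_eq_counter]
  have halpha : alphaB = pyAlphabet := by decide
  rw [halpha]
  congr 1
  rw [List.countP_eq_length_filter]
  congr 1
  congr 1
  funext ch
  rw [PySem.Dict.getD_counter, count_flat]
  rw [Bool.eq_iff_iff]
  simp [List.all_eq_true, List.countP_eq_length, beq_iff_eq, Nat.cast_inj]

-- ===== VERDICT (by name: the statement is the Claim_ definition above) =====
theorem countAnswers_spec : Claim_equal_countAnswers := by
  intro all_groups _
  unfold Spec_countAnswers countAnswers countAnswers_alt
  congr 1
  funext acc group
  simp only []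
  rw [per_group_union, per_group_inter]
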